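-- pv_equiv track=rewrite | github.com/HoonDongKang/Algorithm | 백준/Gold/1600. 말이 되고픈 원숭이/말이 되고픈 원숭이.py | solve
-- ===== SOURCE A (Python) =====
-- from collections import deque
--
-- def solve(jump_count:int, n:int, m:int, field:list[list[int]]) -> int:
--     dist = [[[-1]*(jump_count+1) for _ in range(n)] for _ in range(m)]
--
--     horse_directon = [(2,1),(2,-1),(-2,1),(-2,-1),(1,2),(1,-2),(-1,2),(-1,-2)]
--     monkey_direction = [(1,0), (-1, 0), (0, 1), (0,-1)]
--
--     queue = deque([(0,0,0)])
--     dist[0][0][0] = 0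
--
--     while queue:
--         x, y, jump = queue.popleft()
--
--         if x == n-1 and y == m-1:
--             return dist[y][x][jump]
--
--         for dx, dy in monkey_direction:
--             nx, ny = x + dx, y + dy
--             if 0 <= nx < n and 0 <= ny < m and field[ny][nx] != 1 and dist[ny][nx][jump] == -1:
--                 dist[ny][nx][jump] = dist[y][x][jump] + 1
--                 queue.append((nx, ny, jump))
--
--         if jump >= jump_count:
--             continue
--
--         for dx, dy in horse_directon:
--             nx, ny = x + dx, y + dy
--             if 0 <= nx < n and 0 <= ny < m and field[ny][nx] != 1 and dist[ny][nx][jump+1] == -1: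
--                 dist[ny][nx][jump+1] = dist[y][x][jump] + 1
--                 queue.append((nx, ny, jump+1))
--
--     return -1
-- ===== SOURCE B (Python) =====
-- def solve(jump_count: int, n: int, m: int, field: list[list[int]]) -> int:
--     # Fixpoint iteration on a 3D reachability table: each round recomputes the
--     # whole table from predecessor cells (reach := reach U preds(reach)); the
--     # answer is the first round whose table holds the target cell, and -1 once
--     # the table stops changing.  No queue, no frontier, no distance values.
--     K = jump_count + 1
--     horse = [(2, 1), (2, -1), (-2, 1), (-2, -1), (1, 2), (1, -2), (-1, 2), (-1, -2)]
--     monkey = [(1, 0), (-1, 0), (0, 1), (0, -1)]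
--
--     reach = [[[False] * K for _ in range(n)] for _ in range(m)]
--     reach[0][0][0] = True
--     d = 0
--     while True:
--         if any(reach[m - 1][n - 1]):
--             return d
--         nxt = [[[reach[y][x][j]
--                  or (field[y][x] != 1
--                      and (any(0 <= x - dx < n and 0 <= y - dy < m
--                               and reach[y - dy][x - dx][j]
--                               for dx, dy in monkey)
--                           or (j >= 1
--                               and any(0 <= x - dx < n and 0 <= y - dy < m
--                                       and reach[y - dy][x - dx][j - 1]
--                                       for dx, dy in horse))))
--                  for j in range(K)]
--                 for x in range(n)]
--                for y in range(m)]
--         if nxt == reach: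
--             return -1
--         reach = nxt
--         d += 1
-- ===== Notes on version B (the rewrite author's own statement) =====
-- stated objective: alternative
-- what changed: A's deque-driven BFS over a 3D integer distance array is replaced by a synchronous fixpoint iteration that recomputes the whole 3D boolean reachability table from predecessor cells each round (no queue, no frontier, no distances), returning the first round whose table holds the target cell and -1 once the table stops changing.
-- outside the precondition, e.g. on solve(0, 4, 1, [[0, 1, 0]]): A returns -1, B raises IndexError
import Mathlib
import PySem

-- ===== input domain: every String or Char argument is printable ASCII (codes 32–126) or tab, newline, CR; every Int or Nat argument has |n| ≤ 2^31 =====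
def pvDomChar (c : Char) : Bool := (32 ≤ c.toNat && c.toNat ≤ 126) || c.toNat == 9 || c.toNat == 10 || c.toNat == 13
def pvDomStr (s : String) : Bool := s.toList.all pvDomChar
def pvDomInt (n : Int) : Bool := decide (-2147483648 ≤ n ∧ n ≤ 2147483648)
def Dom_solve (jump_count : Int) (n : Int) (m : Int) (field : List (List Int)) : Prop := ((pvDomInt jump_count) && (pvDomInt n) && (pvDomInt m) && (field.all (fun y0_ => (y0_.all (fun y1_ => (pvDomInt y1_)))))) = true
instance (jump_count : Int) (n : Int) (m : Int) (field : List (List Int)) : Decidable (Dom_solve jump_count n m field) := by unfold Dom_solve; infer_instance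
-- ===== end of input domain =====

-- B replaces A's deque-BFS + 3D distance array by a whole-table fixpoint
-- iteration (reach := reach ∪ preds(reach), recomputed each round); same value.

-- shared helpers: 3D-array indexing (dist[y][x][j] read / write) and the move lists
def get3 {α : Type} (d : List (List (List α))) (dflt : α) (y x j : Nat) : α :=
  ((d.getD y []).getD x []).getD j dflt

def set3 {α : Type} (d : List (List (List α))) (y x j : Nat) (v : α) : List (List (List α)) :=
  d.set y ((d.getD y []).set x (((d.getD y []).getD x []).set j v))

def fieldAt (field : List (List Int)) (y x : Int) : Int :=
  (field.getD y.toNat []).getD x.toNat 0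

def monkeyDirs : List (Int × Int) := [(1,0), (-1,0), (0,1), (0,-1)]
def horseDirs : List (Int × Int) := [(2,1),(2,-1),(-2,1),(-2,-1),(1,2),(1,-2),(-1,2),(-1,-2)]

-- ===== PORT A =====
-- one inner-loop step of A: try direction dxy from (x,y,jump=j), writing level jj
def stepA (n m : Int) (field : List (List Int)) (x y j jj : Int)
    (st : List (List (List Int)) × List (Int × Int × Int)) (dxy : Int × Int) :
    List (List (List Int)) × List (Int × Int × Int) :=
  let nx := x + dxy.1
  let ny := y + dxy.2
  if 0 ≤ nx ∧ nx < n ∧ 0 ≤ ny ∧ ny < m ∧ fieldAt field ny nx ≠ 1 ∧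
      get3 st.1 (-1) ny.toNat nx.toNat jj.toNat = -1 then
    (set3 st.1 ny.toNat nx.toNat jj.toNat (get3 st.1 (-1) y.toNat x.toNat j.toNat + 1),
     st.2 ++ [(nx, ny, jj)])
  else st

-- A's while-loop (fuel bounds the number of pops; it is never exhausted on Pre_ inputs)
def loopA (jc n m : Int) (field : List (List Int)) :
    Nat → List (List (List Int)) → List (Int × Int × Int) → Int
  | _, _, [] => -1
  | 0, _, _ :: _ => -1
  | fuel + 1, dist, (x, y, j) :: rest =>
      if x = n - 1 ∧ y = m - 1 then get3 dist (-1) y.toNat x.toNat j.toNat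
      else
        let p1 := monkeyDirs.foldl (stepA n m field x y j j) (dist, rest)
        if jc ≤ j then loopA jc n m field fuel p1.1 p1.2
        else
          let p2 := horseDirs.foldl (stepA n m field x y j (j + 1)) p1
          loopA jc n m field fuel p2.1 p2.2

def solve (jump_count : Int) (n : Int) (m : Int) (field : List (List Int)) : Int :=
  let dist0 : List (List (List Int)) :=
    (List.range m.toNat).map (fun _ =>
      (List.range n.toNat).map (fun _ =>
        (List.range (jump_count + 1).toNat).map (fun _ => (-1 : Int))))
  loopA jump_count n m field ((n * m * (jump_count + 1)).toNat + 1)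
    (set3 dist0 0 0 0 0) [(0, 0, 0)]

-- ===== PORT B =====
-- one entry of Source B's recomputed table: already reached, or a free cell with a
-- reached monkey predecessor at the same jump level or horse predecessor one below
def pullEntry (n m : Int) (field : List (List Int)) (reach : List (List (List Bool)))
    (y x j : Nat) : Bool :=
  get3 reach false y x j ||
  (fieldAt field (y : Int) (x : Int) != 1 &&
    (monkeyDirs.any (fun dxy =>
        decide (0 ≤ (x : Int) - dxy.1 ∧ (x : Int) - dxy.1 < n ∧
          0 ≤ (y : Int) - dxy.2 ∧ (y : Int) - dxy.2 < m) &&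
        get3 reach false ((y : Int) - dxy.2).toNat ((x : Int) - dxy.1).toNat j) ||
     (decide (1 ≤ j) &&
      horseDirs.any (fun dxy =>
        decide (0 ≤ (x : Int) - dxy.1 ∧ (x : Int) - dxy.1 < n ∧
          0 ≤ (y : Int) - dxy.2 ∧ (y : Int) - dxy.2 < m) &&
        get3 reach false ((y : Int) - dxy.2).toNat ((x : Int) - dxy.1).toNat (j - 1)))))

-- Source B's whole-table recomputation (the nested list comprehension)
def nxtTable (jc n m : Int) (field : List (List Int)) (reach : List (List (List Bool))) :
    List (List (List Bool)) :=
  (List.range m.toNat).map (fun y =>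
    (List.range n.toNat).map (fun x =>
      (List.range (jc + 1).toNat).map (fun j => pullEntry n m field reach y x j)))

-- Source B's "while True" (fuel is a termination device; it is never exhausted on Pre_ inputs)
def loopT (jc n m : Int) (field : List (List Int)) :
    Nat → List (List (List Bool)) → Int → Int
  | 0, _, _ => -1
  | fuel + 1, reach, d =>
    if ((reach.getD (m - 1).toNat []).getD (n - 1).toNat []).any (fun b => b) then d
    else
      let nxt := nxtTable jc n m field reach
      if nxt = reach then -1
      else loopT jc n m field fuel nxt (d + 1)

def solve_alt (jump_count : Int) (n : Int) (m : Int) (field : List (List Int)) : Int :=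
  let reach0 : List (List (List Bool)) :=
    (List.range m.toNat).map (fun _ =>
      (List.range n.toNat).map (fun _ =>
        (List.range (jump_count + 1).toNat).map (fun _ => false)))
  loopT jump_count n m field ((n * m * (jump_count + 1)).toNat + 2)
    (set3 reach0 0 0 0 true) 0

-- ===== PRECONDITION & SPEC =====
-- Pre_ excludes the inputs on which a version raises IndexError: nonpositive grid
-- dimensions or negative jump_count (both raise on the initial start-cell write) and,
-- except in the degenerate 1x1 case neither program inspects, grids without a full
-- m x n prefix (B scans every cell each round and raises on a missing one; A raises
-- on a missing cell it probes, and returns -1 on a few wall-blocked malformed grids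
-- where B raises -- see the cited excluded example).
def Pre_solve (jump_count : Int) (n : Int) (m : Int) (field : List (List Int)) : Prop :=
  0 ≤ jump_count ∧ 1 ≤ n ∧ 1 ≤ m ∧
    ((n = 1 ∧ m = 1) ∨
      (m ≤ (field.length : Int) ∧ ∀ row ∈ field.take m.toNat, n ≤ (row.length : Int)))
instance (jump_count : Int) (n : Int) (m : Int) (field : List (List Int)) : Decidable (Pre_solve jump_count n m field) := by unfold Pre_solve; infer_instance

def pvWitness_solve : Int × Int × Int × List (List Int) := (1, 3, 2, [[0, 0, 0], [0, 1, 0]])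

def Spec_solve (jump_count : Int) (n : Int) (m : Int) (field : List (List Int)) (out : Int) : Prop := out = solve_alt jump_count n m field
instance (jump_count : Int) (n : Int) (m : Int) (field : List (List Int)) (out : Int) : Decidable (Spec_solve jump_count n m field out) := by unfold Spec_solve; infer_instance

-- ===== CLAIM (what is proved, stated in full; the proofs are below) =====
def Claim_equal_solve : Prop := ∀ (jump_count : Int) (n : Int) (m : Int) (field : List (List Int)), Dom_solve jump_count n m field → Pre_solve jump_count n m field → Spec_solve jump_count n m field (solve jump_count n m field)

-- ===== LEMMAS AND PROOFS =====

-- proof-side intermediate program: a level-synchronized BFS over a boolean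
-- visited array; A is proved equal to it (lockstep), and it equal to B's
-- whole-table fixpoint iteration (one pull round = one frontier round).
def movesB (jc n m : Int) (field : List (List Int)) (s : Int × Int × Int) :
    List (Int × Int × Int) :=
  let cand := monkeyDirs.map (fun dxy => (s.1 + dxy.1, s.2.1 + dxy.2, s.2.2)) ++
    (if s.2.2 < jc then
      horseDirs.map (fun dxy => (s.1 + dxy.1, s.2.1 + dxy.2, s.2.2 + 1)) else [])
  cand.filter (fun t => decide (0 ≤ t.1 ∧ t.1 < n ∧ 0 ≤ t.2.1 ∧ t.2.1 < m ∧
    fieldAt field t.2.1 t.1 ≠ 1))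

def exStep (st : List (Int × Int × Int) × List (Int × Int × Int)) (t : Int × Int × Int) :
    List (Int × Int × Int) × List (Int × Int × Int) :=
  if st.1.contains t then st else (st.1 ++ [t], st.2 ++ [t])

def mapVis (d : List (List (List Int))) : List (List (List Bool)) :=
  d.map (List.map (List.map (fun v => v != -1)))

def OkSt (jc n m : Int) (s : Int × Int × Int) : Prop :=
  0 ≤ s.1 ∧ s.1 < n ∧ 0 ≤ s.2.1 ∧ s.2.1 < m ∧ 0 ≤ s.2.2 ∧ s.2.2 ≤ jc

def Shape3 {α : Type} (d : List (List (List α))) (m n k : Nat) : Prop :=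
  d.length = m ∧ ∀ r ∈ d, r.length = n ∧ ∀ c ∈ r, c.length = k

def stepB (n m : Int) (field : List (List Int)) (x y jj : Int)
    (st : List (List (List Bool)) × List (Int × Int × Int)) (dxy : Int × Int) :
    List (List (List Bool)) × List (Int × Int × Int) :=
  let nx := x + dxy.1
  let ny := y + dxy.2
  if 0 ≤ nx ∧ nx < n ∧ 0 ≤ ny ∧ ny < m ∧ fieldAt field ny nx ≠ 1 ∧
      get3 st.1 false ny.toNat nx.toNat jj.toNat = false then
    (set3 st.1 ny.toNat nx.toNat jj.toNat true, st.2 ++ [(nx, ny, jj)])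
  else st

def loopB (jc n m : Int) (field : List (List Int)) :
    Nat → List (List (List Bool)) → List (Int × Int × Int) → List (Int × Int × Int) → Int → Int
  | _, _, [], [], _ => -1
  | fuel, vis, [], s :: nxt, d => loopB jc n m field fuel vis (s :: nxt) [] (d + 1)
  | 0, _, _ :: _, _, _ => -1
  | fuel + 1, vis, (x, y, j) :: rest, nxt, d =>
      if x = n - 1 ∧ y = m - 1 then d
      else
        let p1 := monkeyDirs.foldl (stepB n m field x y j) (vis, nxt)
        if jc ≤ j then loopB jc n m field fuel p1.1 rest p1.2 d
        else
          let p2 := horseDirs.foldl (stepB n m field x y (j + 1)) p1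
          loopB jc n m field fuel p2.1 rest p2.2 d
  termination_by fuel _ f _ _ => (fuel, if f.isEmpty then 1 else 0)
  decreasing_by
    · simp [Prod.lex_def]
    · simp [Prod.lex_def]
    · simp [Prod.lex_def]

lemma getD_map_map {α β : Type} (g : α → β) (l : List (List α)) (y : Nat) :
    (l.map (List.map g)).getD y [] = List.map g (l.getD y []) := by
  simp only [List.getD, List.getElem?_map]
  cases l[y]? <;> rfl

lemma get3_mapVis (d : List (List (List Int))) (y x j : Nat) :
    get3 (mapVis d) false y x j = (get3 d (-1) y x j != -1) := by
  unfold get3 mapVis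
  rw [getD_map_map, getD_map_map]
  generalize (d.getD y []).getD x [] = c
  induction c generalizing j with
  | nil => cases j <;> rfl
  | cons a c ih => cases j with
    | zero => rfl
    | succ j => simpa using ih j

lemma mapVis_set3 (d : List (List (List Int))) (y x j : Nat) (v : Int) :
    mapVis (set3 d y x j v) = set3 (mapVis d) y x j (v != -1) := by
  unfold mapVis set3
  rw [List.map_set, getD_map_map, getD_map_map, List.map_set, List.map_set]

lemma getD_set_self {α : Type} (l : List α) (i : Nat) (v dflt : α) (h : i < l.length) :
    (l.set i v).getD i dflt = v := by
  rw [List.getD_eq_getElem?_getD, List.getElem?_set_self h]; rfl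

lemma getD_set_ne {α : Type} (l : List α) (i i' : Nat) (v dflt : α) (h : i ≠ i') :
    (l.set i v).getD i' dflt = l.getD i' dflt := by
  rw [List.getD_eq_getElem?_getD, List.getElem?_set_ne h, ← List.getD_eq_getElem?_getD]

lemma shape3_set3 {α : Type} {d : List (List (List α))} {m n k : Nat} (h : Shape3 d m n k)
    (y x j : Nat) (v : α) : Shape3 (set3 d y x j v) m n k := by
  obtain ⟨hlen, hrow⟩ := h
  by_cases hy : y < d.length
  · refine ⟨by simp [set3, hlen], ?_⟩
    intro r hr
    unfold set3 at hr
    rcases List.mem_or_eq_of_mem_set hr with hr | hr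
    · exact hrow r hr
    · subst hr
      have hmem : d.getD y [] ∈ d := by
        rw [List.getD_eq_getElem _ _ hy]; exact List.getElem_mem hy
      obtain ⟨hrl, hcell⟩ := hrow _ hmem
      by_cases hx : x < (d.getD y []).length
      · refine ⟨by simpa using hrl, ?_⟩
        intro c hc
        rcases List.mem_or_eq_of_mem_set hc with hc | hc
        · exact hcell c hc
        · subst hc
          have hcm : (d.getD y []).getD x [] ∈ d.getD y [] := by
            rw [List.getD_eq_getElem _ _ hx]; exact List.getElem_mem hx
          simpa using hcell _ hcm
      · rw [List.set_eq_of_length_le (Nat.le_of_not_lt hx)]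
        exact ⟨hrl, hcell⟩
  · unfold set3
    rw [List.set_eq_of_length_le (Nat.le_of_not_lt hy)]
    exact ⟨hlen, hrow⟩

lemma get3_set3_same {α : Type} {d : List (List (List α))} {y x j : Nat} (dflt : α) (v : α)
    (hy : y < d.length) (hx : x < (d.getD y []).length)
    (hj : j < ((d.getD y []).getD x []).length) :
    get3 (set3 d y x j v) dflt y x j = v := by
  unfold get3 set3
  rw [getD_set_self _ _ _ _ hy, getD_set_self _ _ _ _ hx, getD_set_self _ _ _ _ hj]

lemma get3_set3_ne {α : Type} (d : List (List (List α))) (dflt : α) (v : α)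
    {y x j y' x' j' : Nat} (h : ¬(y' = y ∧ x' = x ∧ j' = j)) :
    get3 (set3 d y x j v) dflt y' x' j' = get3 d dflt y' x' j' := by
  unfold get3 set3
  by_cases h1 : y = y'
  · subst h1
    by_cases hy : y < d.length
    · rw [getD_set_self _ _ _ _ hy]
      by_cases h2 : x = x'
      · subst h2
        by_cases hx : x < (d.getD y []).length
        · rw [getD_set_self _ _ _ _ hx]
          have h3 : j ≠ j' := fun hj => h ⟨rfl, rfl, hj.symm⟩
          rw [getD_set_ne _ _ _ _ _ h3]
        · rw [List.set_eq_of_length_le (Nat.le_of_not_lt hx)]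
      · rw [getD_set_ne _ _ _ _ _ h2]
    · rw [List.set_eq_of_length_le (Nat.le_of_not_lt hy)]
  · rw [getD_set_ne _ _ _ _ _ h1]

-- one fold over a direction list relates A's (dist, queue) to the level BFS (vis, next)
lemma fold_rel (n m jc : Int) (field : List (List Int)) (x y j jj d : Int)
    (hd : 0 ≤ d) (hjj0 : 0 ≤ jj) (hjj1 : jj ≤ jc) :
    ∀ (dirs : List (Int × Int)) (dist : List (List (List Int)))
      (q next : List (Int × Int × Int)),
    Shape3 dist m.toNat n.toNat (jc + 1).toNat →
    get3 dist (-1) y.toNat x.toNat j.toNat = d →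
    ∃ app,
      (dirs.foldl (stepA n m field x y j jj) (dist, q)).2 = q ++ app ∧
      (dirs.foldl (stepB n m field x y jj) (mapVis dist, next)).1
        = mapVis (dirs.foldl (stepA n m field x y j jj) (dist, q)).1 ∧
      (dirs.foldl (stepB n m field x y jj) (mapVis dist, next)).2 = next ++ app ∧
      Shape3 (dirs.foldl (stepA n m field x y j jj) (dist, q)).1 m.toNat n.toNat (jc + 1).toNat ∧
      (∀ c1 c2 c3, get3 dist (-1) c1 c2 c3 ≠ -1 →
        get3 (dirs.foldl (stepA n m field x y j jj) (dist, q)).1 (-1) c1 c2 c3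
          = get3 dist (-1) c1 c2 c3) ∧
      (∀ s ∈ app, OkSt jc n m s ∧
        get3 (dirs.foldl (stepA n m field x y j jj) (dist, q)).1 (-1)
          s.2.1.toNat s.1.toNat s.2.2.toNat = d + 1) := by
  intro dirs
  induction dirs with
  | nil =>
    intro dist q next hshape hget
    exact ⟨[], by simp, rfl, by simp, hshape, fun _ _ _ _ => rfl, by simp⟩
  | cons dxy dirs ih =>
    intro dist q next hshape hget
    rw [List.foldl_cons, List.foldl_cons]
    set nx := x + dxy.1 with hnx
    set ny := y + dxy.2 with hny
    have hiff : (get3 (mapVis dist) false ny.toNat nx.toNat jj.toNat = false)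
        ↔ (get3 dist (-1) ny.toNat nx.toNat jj.toNat = -1) := by
      rw [get3_mapVis]; simp
    by_cases hc : 0 ≤ nx ∧ nx < n ∧ 0 ≤ ny ∧ ny < m ∧ fieldAt field ny nx ≠ 1 ∧
        get3 dist (-1) ny.toNat nx.toNat jj.toNat = -1
    · obtain ⟨h1, h2, h3, h4, h5, h6⟩ := hc
      have hcB : 0 ≤ nx ∧ nx < n ∧ 0 ≤ ny ∧ ny < m ∧ fieldAt field ny nx ≠ 1 ∧
          get3 (mapVis dist) false ny.toNat nx.toNat jj.toNat = false :=
        ⟨h1, h2, h3, h4, h5, hiff.mpr h6⟩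
      have hA : stepA n m field x y j jj (dist, q) dxy
          = (set3 dist ny.toNat nx.toNat jj.toNat (d + 1), q ++ [(nx, ny, jj)]) := by
        simp only [stepA]
        rw [if_pos ⟨h1, h2, h3, h4, h5, h6⟩, hget]
      have hB : stepB n m field x y jj (mapVis dist, next) dxy
          = (mapVis (set3 dist ny.toNat nx.toNat jj.toNat (d + 1)), next ++ [(nx, ny, jj)]) := by
        simp only [stepB]
        rw [if_pos hcB, mapVis_set3]
        have : ((d + 1 : Int) != -1) = true := by simp; omega
        rw [this]
      rw [hA, hB]
      have hylen : ny.toNat < dist.length := by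
        rw [hshape.1]; omega
      have hrowmem : dist.getD ny.toNat [] ∈ dist := by
        rw [List.getD_eq_getElem _ _ hylen]; exact List.getElem_mem hylen
      obtain ⟨hrl, hcl⟩ := hshape.2 _ hrowmem
      have hxlen : nx.toNat < (dist.getD ny.toNat []).length := by rw [hrl]; omega
      have hcellmem : (dist.getD ny.toNat []).getD nx.toNat [] ∈ dist.getD ny.toNat [] := by
        rw [List.getD_eq_getElem _ _ hxlen]; exact List.getElem_mem hxlen
      have hjlen : jj.toNat < ((dist.getD ny.toNat []).getD nx.toNat []).length := by
        rw [hcl _ hcellmem]; omega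
      have hstep_pres : ∀ c1 c2 c3, get3 dist (-1) c1 c2 c3 ≠ -1 →
          get3 (set3 dist ny.toNat nx.toNat jj.toNat (d + 1)) (-1) c1 c2 c3
            = get3 dist (-1) c1 c2 c3 := by
        intro c1 c2 c3 hne
        by_cases ht : c1 = ny.toNat ∧ c2 = nx.toNat ∧ c3 = jj.toNat
        · obtain ⟨e1, e2, e3⟩ := ht; subst e1; subst e2; subst e3
          exact absurd h6 hne
        · exact get3_set3_ne dist (-1) (d + 1) ht
      have hget' : get3 (set3 dist ny.toNat nx.toNat jj.toNat (d + 1)) (-1)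
          y.toNat x.toNat j.toNat = d := by
        rw [hstep_pres _ _ _ (by rw [hget]; omega), hget]
      obtain ⟨app', e1, e2, e3, hshape', hpres', happ'⟩ :=
        ih (set3 dist ny.toNat nx.toNat jj.toNat (d + 1)) (q ++ [(nx, ny, jj)])
          (next ++ [(nx, ny, jj)])
          (shape3_set3 hshape ny.toNat nx.toNat jj.toNat (d + 1)) hget'
      refine ⟨(nx, ny, jj) :: app', by simpa using e1, e2, by simpa using e3, hshape', ?_, ?_⟩
      · intro c1 c2 c3 hne
        rw [hpres' _ _ _ (by rw [hstep_pres _ _ _ hne]; exact hne), hstep_pres _ _ _ hne]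
      · intro s hs
        have hnew : get3 (set3 dist ny.toNat nx.toNat jj.toNat (d + 1)) (-1)
            ny.toNat nx.toNat jj.toNat = d + 1 :=
          get3_set3_same (-1) (d + 1) hylen hxlen hjlen
        rcases List.mem_cons.mp hs with hs | hs
        · subst hs
          refine ⟨⟨h1, h2, h3, h4, hjj0, hjj1⟩, ?_⟩
          show get3 _ (-1) ny.toNat nx.toNat jj.toNat = d + 1
          rw [hpres' _ _ _ (by rw [hnew]; omega), hnew]
        · exact happ' s hs
    · have hA : stepA n m field x y j jj (dist, q) dxy = (dist, q) := by
        simp only [stepA]; rw [if_neg hc]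
      have hB : stepB n m field x y jj (mapVis dist, next) dxy = (mapVis dist, next) := by
        simp only [stepB]
        rw [if_neg (fun hcB => hc ⟨hcB.1, hcB.2.1, hcB.2.2.1, hcB.2.2.2.1, hcB.2.2.2.2.1,
          hiff.mp hcB.2.2.2.2.2⟩)]
      rw [hA, hB]
      exact ih dist q next hshape hget

-- the lockstep lemma: A's queue is the level BFS's frontier ++ next
lemma main_rel (jc n m : Int) (field : List (List Int)) :
    ∀ (μ fuel : Nat) (dist : List (List (List Int)))
      (f nxt : List (Int × Int × Int)) (d : Int),
    2 * fuel + (if f = [] then 1 else 0) ≤ μ →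
    Shape3 dist m.toNat n.toNat (jc + 1).toNat →
    0 ≤ d →
    (∀ s ∈ f, OkSt jc n m s ∧ get3 dist (-1) s.2.1.toNat s.1.toNat s.2.2.toNat = d) →
    (∀ s ∈ nxt, OkSt jc n m s ∧ get3 dist (-1) s.2.1.toNat s.1.toNat s.2.2.toNat = d + 1) →
    loopA jc n m field fuel dist (f ++ nxt) = loopB jc n m field fuel (mapVis dist) f nxt d := by
  intro μ
  induction μ with
  | zero =>
    intro fuel dist f nxt d hμ hshape hd hf hnxt
    cases f with
    | nil => exfalso; simp at hμ
    | cons s rest =>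
      obtain ⟨x, y, j⟩ := s
      have hfuel : fuel = 0 := by simp at hμ; omega
      subst hfuel
      simp [loopA, loopB]
  | succ μ ihμ =>
    intro fuel dist f nxt d hμ hshape hd hf hnxt
    cases f with
    | nil =>
      cases nxt with
      | nil => simp [loopA, loopB]
      | cons s nxt' =>
        have hB : loopB jc n m field fuel (mapVis dist) [] (s :: nxt') d
            = loopB jc n m field fuel (mapVis dist) (s :: nxt') [] (d + 1) := by
          rw [loopB]
        rw [hB]
        have := ihμ fuel dist (s :: nxt') [] (d + 1)
          (by simp at hμ ⊢; omega) hshape (by omega)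
          (by intro t ht; exact hnxt t ht) (by simp)
        simpa using this
    | cons s rest =>
      obtain ⟨x, y, j⟩ := s
      obtain ⟨hok, hget⟩ := hf _ (List.mem_cons_self)
      obtain ⟨hx0, hxn, hy0, hym, hj0, hjc'⟩ := hok
      have hj0' : 0 ≤ j := hj0
      have hjc2 : j ≤ jc := hjc'
      cases fuel with
      | zero => simp [loopA, loopB]
      | succ fu =>
        simp only [List.cons_append]
        rw [show loopA jc n m field (fu + 1) dist ((x, y, j) :: (rest ++ nxt))
            = if x = n - 1 ∧ y = m - 1 then get3 dist (-1) y.toNat x.toNat j.toNat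
              else
                let p1 := monkeyDirs.foldl (stepA n m field x y j j) (dist, rest ++ nxt)
                if jc ≤ j then loopA jc n m field fu p1.1 p1.2
                else
                  let p2 := horseDirs.foldl (stepA n m field x y j (j + 1)) p1
                  loopA jc n m field fu p2.1 p2.2 from rfl]
        rw [show loopB jc n m field (fu + 1) (mapVis dist) ((x, y, j) :: rest) nxt d
            = if x = n - 1 ∧ y = m - 1 then d
              else
                let p1 := monkeyDirs.foldl (stepB n m field x y j) (mapVis dist, nxt)
                if jc ≤ j then loopB jc n m field fu p1.1 rest p1.2 d
                else
                  let p2 := horseDirs.foldl (stepB n m field x y (j + 1)) p1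
                  loopB jc n m field fu p2.1 rest p2.2 d from by rw [loopB]]
        simp only []
        by_cases htgt : x = n - 1 ∧ y = m - 1
        · rw [if_pos htgt, if_pos htgt, hget]
        · rw [if_neg htgt, if_neg htgt]
          have hmu2 : 2 * fu + 1 <= μ := by
            split at hμ
            · simp_all
            · omega
          obtain ⟨app1, e1, e2, e3, hshape1, hpres1, happ1⟩ :=
            fold_rel n m jc field x y j j d hd hj0 hjc' monkeyDirs dist (rest ++ nxt) nxt
              hshape hget
          have hget1 : get3 (monkeyDirs.foldl (stepA n m field x y j j) (dist, rest ++ nxt)).1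
              (-1) y.toNat x.toNat j.toNat = d := by
            rw [hpres1 _ _ _ (by rw [hget]; omega), hget]
          by_cases hjmp : jc ≤ j
          · rw [if_pos hjmp, if_pos hjmp]
            rw [e1, e2, e3]
            have := ihμ fu (monkeyDirs.foldl (stepA n m field x y j j) (dist, rest ++ nxt)).1
              rest (nxt ++ app1) d (by split <;> omega) hshape1 hd
              (by
                intro t ht
                obtain ⟨htok, htv⟩ := hf _ (List.mem_cons_of_mem _ ht)
                exact ⟨htok, by rw [hpres1 _ _ _ (by rw [htv]; omega), htv]⟩)
              (by
                intro t ht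
                rcases List.mem_append.mp ht with ht | ht
                · obtain ⟨htok, htv⟩ := hnxt t ht
                  exact ⟨htok, by rw [hpres1 _ _ _ (by rw [htv]; omega), htv]⟩
                · exact happ1 t ht)
            simpa using this
          · rw [if_neg hjmp, if_neg hjmp]
            obtain ⟨app2, f1, f2, f3, hshape2, hpres2, happ2⟩ :=
              fold_rel n m jc field x y j (j + 1) d hd (by omega) (by omega) horseDirs
                (monkeyDirs.foldl (stepA n m field x y j j) (dist, rest ++ nxt)).1
                ((rest ++ nxt) ++ app1) (nxt ++ app1) hshape1 hget1
            have hq : (monkeyDirs.foldl (stepA n m field x y j j) (dist, rest ++ nxt))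
                = ((monkeyDirs.foldl (stepA n m field x y j j) (dist, rest ++ nxt)).1,
                   (rest ++ nxt) ++ app1) := by
              rw [Prod.ext_iff]; exact ⟨rfl, e1⟩
            have hqB : (monkeyDirs.foldl (stepB n m field x y j) (mapVis dist, nxt))
                = (mapVis (monkeyDirs.foldl (stepA n m field x y j j) (dist, rest ++ nxt)).1,
                   nxt ++ app1) := by
              rw [Prod.ext_iff]; exact ⟨e2, e3⟩
            rw [hq, hqB]
            rw [f1, f2, f3]
            have := ihμ fu
              (horseDirs.foldl (stepA n m field x y j (j + 1))
                ((monkeyDirs.foldl (stepA n m field x y j j) (dist, rest ++ nxt)).1,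
                 (rest ++ nxt) ++ app1)).1
              rest ((nxt ++ app1) ++ app2) d (by split <;> omega)
              hshape2 hd
              (by
                intro t ht
                obtain ⟨htok, htv⟩ := hf _ (List.mem_cons_of_mem _ ht)
                have hv1 : get3 (monkeyDirs.foldl (stepA n m field x y j j)
                    (dist, rest ++ nxt)).1 (-1) t.2.1.toNat t.1.toNat t.2.2.toNat = d := by
                  rw [hpres1 _ _ _ (by rw [htv]; omega), htv]
                exact ⟨htok, by rw [hpres2 _ _ _ (by rw [hv1]; omega), hv1]⟩)
              (by
                intro t ht
                rcases List.mem_append.mp ht with ht | ht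
                · have hv1 : get3 (monkeyDirs.foldl (stepA n m field x y j j)
                      (dist, rest ++ nxt)).1 (-1) t.2.1.toNat t.1.toNat t.2.2.toNat = d + 1 := by
                    rcases List.mem_append.mp ht with ht | ht
                    · obtain ⟨htok, htv⟩ := hnxt t ht
                      rw [hpres1 _ _ _ (by rw [htv]; omega), htv]
                    · exact (happ1 t ht).2
                  have htok : OkSt jc n m t := by
                    rcases List.mem_append.mp ht with ht | ht
                    · exact (hnxt t ht).1
                    · exact (happ1 t ht).1
                  exact ⟨htok, by rw [hpres2 _ _ _ (by rw [hv1]; omega), hv1]⟩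
                · exact happ2 t ht)
            simpa using this

lemma shape3_init {α : Type} (mm nn kk : Nat) (c : α) :
    Shape3 ((List.range mm).map (fun _ =>
      (List.range nn).map (fun _ => (List.range kk).map (fun _ => c)))) mm nn kk := by
  refine ⟨by simp, ?_⟩
  intro r hr
  simp only [List.mem_map] at hr
  obtain ⟨_, _, hr⟩ := hr
  subst hr
  refine ⟨by simp, ?_⟩
  intro cl hcl
  simp only [List.mem_map] at hcl
  obtain ⟨_, _, hcl⟩ := hcl
  subst hcl
  simp

-- ========== level BFS = whole-table fixpoint iteration ==========

lemma getD_map_range {α : Type} (k : Nat) (c : α) (i : Nat) (d : α) :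
    ((List.range k).map (fun _ => c)).getD i d = if i < k then c else d := by
  rcases Nat.lt_or_ge i k with h | h
  · rw [List.getD_eq_getElem _ _ (by simpa using h)]
    simp [h]
  · rw [List.getD_eq_default _ _ (by simpa using h)]
    simp [Nat.not_lt.mpr h]

lemma get3_init_const {α : Type} (mm nn kk : Nat) (c : α) (y x j : Nat) :
    get3 ((List.range mm).map (fun _ =>
      (List.range nn).map (fun _ => (List.range kk).map (fun _ => c)))) c y x j = c := by
  unfold get3
  rw [getD_map_range]
  split
  · rw [getD_map_range]
    split
    · rw [getD_map_range]
      split <;> rfl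
    · simp [List.getD]
  · simp [List.getD]

def VV (jc n m : Int) : Nat := (n * m * (jc + 1)).toNat

-- the invariant tying the visited array to the member list
def InvV (jc n m : Int) (vis : List (List (List Bool))) (R : List (Int × Int × Int)) : Prop :=
  (∀ t ∈ R, OkSt jc n m t) ∧
  ∀ t, OkSt jc n m t →
    (get3 vis false t.2.1.toNat t.1.toNat t.2.2.toNat = true ↔ t ∈ R)

-- mark-if-unvisited step over a candidate state (the common shape of stepB's folds)
def markStep (st : List (List (List Bool)) × List (Int × Int × Int))
    (t : Int × Int × Int) : List (List (List Bool)) × List (Int × Int × Int) :=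
  if get3 st.1 false t.2.1.toNat t.1.toNat t.2.2.toNat = false then
    (set3 st.1 t.2.1.toNat t.1.toNat t.2.2.toNat true, st.2 ++ [t])
  else st

lemma stepfold_eq (n m : Int) (field : List (List Int)) (x y jj : Int) :
    ∀ (dirs : List (Int × Int)) (st : List (List (List Bool)) × List (Int × Int × Int)),
    dirs.foldl (stepB n m field x y jj) st
      = ((dirs.map (fun dxy => (x + dxy.1, y + dxy.2, jj))).filter
          (fun t => decide (0 ≤ t.1 ∧ t.1 < n ∧ 0 ≤ t.2.1 ∧ t.2.1 < m ∧
            fieldAt field t.2.1 t.1 ≠ 1))).foldl markStep st := by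
  intro dirs
  induction dirs with
  | nil => intro st; rfl
  | cons dxy dirs ih =>
    intro st
    rw [List.foldl_cons, List.map_cons, List.filter_cons]
    by_cases hp : 0 ≤ x + dxy.1 ∧ x + dxy.1 < n ∧ 0 ≤ y + dxy.2 ∧ y + dxy.2 < m ∧
        fieldAt field (y + dxy.2) (x + dxy.1) ≠ 1
    · rw [if_pos (by simpa using hp)]
      rw [List.foldl_cons]
      have hstep : stepB n m field x y jj st dxy = markStep st (x + dxy.1, y + dxy.2, jj) := by
        simp only [stepB, markStep]
        by_cases hv : get3 st.1 false (y + dxy.2).toNat (x + dxy.1).toNat jj.toNat = false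
        · rw [if_pos ⟨hp.1, hp.2.1, hp.2.2.1, hp.2.2.2.1, hp.2.2.2.2, hv⟩, if_pos hv]
        · rw [if_neg (fun hc => hv hc.2.2.2.2.2), if_neg hv]
      rw [hstep]
      exact ih _
    · rw [if_neg (by simpa using hp)]
      have hstep : stepB n m field x y jj st dxy = st := by
        simp only [stepB]
        rw [if_neg (fun hc => hp ⟨hc.1, hc.2.1, hc.2.2.1, hc.2.2.2.1, hc.2.2.2.2.1⟩)]
      rw [hstep]
      exact ih _

-- processing one state in loopB is a markStep fold over its movesB list
lemma proc_eq (jc n m : Int) (field : List (List Int)) (x y j : Int)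
    (st : List (List (List Bool)) × List (Int × Int × Int)) :
    (if jc ≤ j then monkeyDirs.foldl (stepB n m field x y j) st
     else horseDirs.foldl (stepB n m field x y (j + 1))
            (monkeyDirs.foldl (stepB n m field x y j) st))
      = (movesB jc n m field (x, y, j)).foldl markStep st := by
  unfold movesB
  simp only []
  rw [List.filter_append, List.foldl_append]
  by_cases hjmp : jc ≤ j
  · rw [if_pos hjmp]
    rw [show (if (x, y, j).2.2 < jc then
        horseDirs.map (fun dxy => ((x, y, j).1 + dxy.1, (x, y, j).2.1 + dxy.2, (x, y, j).2.2 + 1))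
        else []) = [] from by rw [if_neg (by simp; omega)]]
    rw [List.filter_nil]
    rw [stepfold_eq n m field x y j monkeyDirs st]
    rfl
  · rw [if_neg hjmp]
    rw [show (if (x, y, j).2.2 < jc then
        horseDirs.map (fun dxy => ((x, y, j).1 + dxy.1, (x, y, j).2.1 + dxy.2, (x, y, j).2.2 + 1))
        else []) = horseDirs.map (fun dxy => (x + dxy.1, y + dxy.2, j + 1))
        from by rw [if_pos (by simp; omega)]]
    rw [stepfold_eq n m field x y j monkeyDirs st,
        stepfold_eq n m field x y (j + 1) horseDirs]

lemma movesB_ok (jc n m : Int) (field : List (List Int)) (s t : Int × Int × Int)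
    (hs0 : 0 ≤ s.2.2) (hs1 : s.2.2 ≤ jc) (ht : t ∈ movesB jc n m field s) :
    OkSt jc n m t := by
  unfold movesB at ht
  rw [List.mem_filter] at ht
  obtain ⟨hc, hb⟩ := ht
  simp only [decide_eq_true_eq] at hb
  obtain ⟨h1, h2, h3, h4, _⟩ := hb
  refine ⟨h1, h2, h3, h4, ?_, ?_⟩ <;>
  · simp only [List.mem_append, List.mem_map] at hc
    rcases hc with ⟨dxy, _, hdx⟩ | hc
    · subst hdx; simp; omega
    · split at hc
      · simp only [List.mem_map] at hc
        obtain ⟨dxy, _, hdx⟩ := hc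
        subst hdx; simp; omega
      · simp at hc

-- index facts from the shape + a state in bounds
lemma okst_idx (jc n m : Int) (t : Int × Int × Int) (h : OkSt jc n m t)
    (vis : List (List (List Bool))) (hs : Shape3 vis m.toNat n.toNat (jc + 1).toNat) :
    t.2.1.toNat < vis.length ∧ t.1.toNat < (vis.getD t.2.1.toNat []).length ∧
      t.2.2.toNat < ((vis.getD t.2.1.toNat []).getD t.1.toNat []).length := by
  obtain ⟨h1, h2, h3, h4, h5, h6⟩ := h
  have hy : t.2.1.toNat < vis.length := by rw [hs.1]; omega
  have hrowmem : vis.getD t.2.1.toNat [] ∈ vis := by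
    rw [List.getD_eq_getElem _ _ hy]; exact List.getElem_mem hy
  obtain ⟨hrl, hcl⟩ := hs.2 _ hrowmem
  have hx : t.1.toNat < (vis.getD t.2.1.toNat []).length := by rw [hrl]; omega
  have hcellmem : (vis.getD t.2.1.toNat []).getD t.1.toNat [] ∈ vis.getD t.2.1.toNat [] := by
    rw [List.getD_eq_getElem _ _ hx]; exact List.getElem_mem hx
  refine ⟨hy, hx, ?_⟩
  rw [hcl _ hcellmem]; omega

lemma okst_inj (jc n m : Int) (t t' : Int × Int × Int)
    (h : OkSt jc n m t) (h' : OkSt jc n m t')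
    (e : t'.2.1.toNat = t.2.1.toNat ∧ t'.1.toNat = t.1.toNat ∧ t'.2.2.toNat = t.2.2.toNat) :
    t' = t := by
  obtain ⟨a, b, c⟩ := t
  obtain ⟨a', b', c'⟩ := t'
  simp only [OkSt] at h h'
  simp only at e
  simp only [Prod.mk.injEq]
  refine ⟨?_, ?_, ?_⟩ <;> omega

-- simulating one candidate list: markStep on (vis, nxt) vs exStep on (mem, new)
lemma cand_sim (jc n m : Int) :
    ∀ (l : List (Int × Int × Int)) (vis : List (List (List Bool)))
      (nxt mem new : List (Int × Int × Int)),
    (∀ t ∈ l, OkSt jc n m t) →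
    Shape3 vis m.toNat n.toNat (jc + 1).toNat →
    InvV jc n m vis mem →
    mem.Nodup →
    ∃ Δ,
      (l.foldl exStep (mem, new)) = (mem ++ Δ, new ++ Δ) ∧
      (l.foldl markStep (vis, nxt)).2 = nxt ++ Δ ∧
      Shape3 (l.foldl markStep (vis, nxt)).1 m.toNat n.toNat (jc + 1).toNat ∧
      InvV jc n m (l.foldl markStep (vis, nxt)).1 (mem ++ Δ) ∧
      (mem ++ Δ).Nodup ∧
      (∀ t ∈ Δ, OkSt jc n m t ∧ t ∈ l) ∧
      (∀ t ∈ l, t ∈ mem ++ Δ) := by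
  intro l
  induction l with
  | nil =>
    intro vis nxt mem new _ hsh hInv hnd
    exact ⟨[], by simp, by simp, hsh, by simpa using hInv, by simpa using hnd, by simp, by simp⟩
  | cons t l ih =>
    intro vis nxt mem new hok hsh hInv hnd
    have htOk : OkSt jc n m t := hok t List.mem_cons_self
    have hiff := hInv.2 t htOk
    rw [List.foldl_cons, List.foldl_cons]
    by_cases hmem : t ∈ mem
    · have hex : exStep (mem, new) t = (mem, new) := by
        unfold exStep
        rw [if_pos (by simpa using hmem)]
      have hmk : markStep (vis, nxt) t = (vis, nxt) := by
        unfold markStep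
        rw [if_neg (by rw [show get3 vis false t.2.1.toNat t.1.toNat t.2.2.toNat = true
          from hiff.mpr hmem]; simp)]
      rw [hex, hmk]
      obtain ⟨Δ, e1, e2, e3, e4, e5, e6, e7⟩ :=
        ih vis nxt mem new (fun u hu => hok u (List.mem_cons_of_mem _ hu)) hsh hInv hnd
      exact ⟨Δ, e1, e2, e3, e4, e5,
        fun u hu => ⟨(e6 u hu).1, List.mem_cons_of_mem _ (e6 u hu).2⟩,
        fun u hu => by
        rcases List.mem_cons.mp hu with rfl | hu
        · exact List.mem_append_left _ hmem
        · exact e7 u hu⟩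
    · have hvf : get3 vis false t.2.1.toNat t.1.toNat t.2.2.toNat = false := by
        cases hval : get3 vis false t.2.1.toNat t.1.toNat t.2.2.toNat
        · rfl
        · exact absurd (hiff.mp hval) hmem
      have hex : exStep (mem, new) t = (mem ++ [t], new ++ [t]) := by
        unfold exStep
        rw [if_neg (by simpa using hmem)]
      have hmk : markStep (vis, nxt) t
          = (set3 vis t.2.1.toNat t.1.toNat t.2.2.toNat true, nxt ++ [t]) := by
        unfold markStep
        rw [if_pos hvf]
      rw [hex, hmk]
      obtain ⟨hy, hx, hj⟩ := okst_idx jc n m t htOk vis hsh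
      have hsh' : Shape3 (set3 vis t.2.1.toNat t.1.toNat t.2.2.toNat true)
          m.toNat n.toNat (jc + 1).toNat := shape3_set3 hsh _ _ _ _
      have hInv' : InvV jc n m (set3 vis t.2.1.toNat t.1.toNat t.2.2.toNat true) (mem ++ [t]) := by
        refine ⟨?_, ?_⟩
        · intro u hu
          rcases List.mem_append.mp hu with hu | hu
          · exact hInv.1 u hu
          · obtain rfl := List.mem_singleton.mp hu; exact htOk
        · intro u huOk
          by_cases hidx : u.2.1.toNat = t.2.1.toNat ∧ u.1.toNat = t.1.toNat ∧
              u.2.2.toNat = t.2.2.toNat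
          · have hut : u = t := okst_inj jc n m t u htOk huOk hidx
            subst hut
            rw [get3_set3_same false true hy hx hj]
            simp
          · rw [get3_set3_ne vis false true hidx]
            rw [hInv.2 u huOk]
            constructor
            · intro hu; exact List.mem_append_left _ hu
            · intro hu
              rcases List.mem_append.mp hu with hu | hu
              · exact hu
              · obtain rfl := List.mem_singleton.mp hu
                exact absurd ⟨rfl, rfl, rfl⟩ hidx
      have hdisj : mem.Disjoint [t] := by
        intro a ha hb
        obtain rfl : a = t := by simpa using hb
        exact hmem ha
      have hnd' : (mem ++ [t]).Nodup := hnd.append (List.nodup_singleton t) hdisj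
      obtain ⟨Δ, e1, e2, e3, e4, e5, e6, e7⟩ :=
        ih (set3 vis t.2.1.toNat t.1.toNat t.2.2.toNat true) (nxt ++ [t]) (mem ++ [t])
          (new ++ [t]) (fun u hu => hok u (List.mem_cons_of_mem _ hu)) hsh' hInv' hnd'
      refine ⟨t :: Δ, ?_, ?_, e3, ?_, ?_, ?_, ?_⟩
      · rw [e1]; simp
      · rw [e2]; simp
      · rw [show mem ++ t :: Δ = (mem ++ [t]) ++ Δ by simp]; exact e4
      · rw [show mem ++ t :: Δ = (mem ++ [t]) ++ Δ by simp]; exact e5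
      · intro u hu
        rcases List.mem_cons.mp hu with rfl | hu
        · exact ⟨htOk, List.mem_cons_self⟩
        · exact ⟨(e6 u hu).1, List.mem_cons_of_mem _ (e6 u hu).2⟩
      · intro u hu
        rcases List.mem_cons.mp hu with rfl | hu
        · simp
        · have := e7 u hu
          simp only [List.append_assoc, List.singleton_append] at this ⊢
          exact this

-- if the frontier holds the target, loopB returns d (given enough fuel)
lemma loopB_target (jc n m : Int) (field : List (List Int)) :
    ∀ (f : List (Int × Int × Int)) (fuel : Nat) (vis : List (List (List Bool)))
      (nxt : List (Int × Int × Int)) (d : Int),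
    (∃ s ∈ f, s.1 = n - 1 ∧ s.2.1 = m - 1) → f.length ≤ fuel →
    loopB jc n m field fuel vis f nxt d = d := by
  intro f
  induction f with
  | nil => intro fuel vis nxt d h; simp at h
  | cons s rest ih =>
    intro fuel vis nxt d h hlen
    obtain ⟨x, y, j⟩ := s
    cases fuel with
    | zero => simp at hlen
    | succ fu =>
      rw [show loopB jc n m field (fu + 1) vis ((x, y, j) :: rest) nxt d
          = if x = n - 1 ∧ y = m - 1 then d
            else
              let p1 := monkeyDirs.foldl (stepB n m field x y j) (vis, nxt)
              if jc ≤ j then loopB jc n m field fu p1.1 rest p1.2 d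
              else
                let p2 := horseDirs.foldl (stepB n m field x y (j + 1)) p1
                loopB jc n m field fu p2.1 rest p2.2 d from by rw [loopB]]
      by_cases htgt : x = n - 1 ∧ y = m - 1
      · rw [if_pos htgt]
      · rw [if_neg htgt]
        obtain ⟨t, htm, htgt'⟩ := h
        rcases List.mem_cons.mp htm with rfl | htm
      
        · exact absurd htgt' htgt
        · simp only []
          have hrest : ∃ t ∈ rest, t.1 = n - 1 ∧ t.2.1 = m - 1 := ⟨t, htm, htgt'⟩
          have hlen' : rest.length ≤ fu := by simp at hlen; omega
          by_cases hjmp : jc ≤ j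
          · rw [if_pos hjmp]; exact ih fu _ _ d hrest hlen'
          · rw [if_neg hjmp]; exact ih fu _ _ d hrest hlen'

-- a target-free frontier round of loopB, in lockstep with the exStep folds
lemma round_sim (jc n m : Int) (field : List (List Int)) (d : Int) :
    ∀ (f : List (Int × Int × Int)) (fl : Nat) (vis : List (List (List Bool)))
      (nxt mem new : List (Int × Int × Int)),
    (∀ s ∈ f, OkSt jc n m s ∧ ¬(s.1 = n - 1 ∧ s.2.1 = m - 1)) →
    Shape3 vis m.toNat n.toNat (jc + 1).toNat →
    InvV jc n m vis mem →
    mem.Nodup →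
    ∃ Δ vis',
      loopB jc n m field (fl + f.length) vis f nxt d = loopB jc n m field fl vis' [] (nxt ++ Δ) d ∧
      (f.foldl (fun st s => (movesB jc n m field s).foldl exStep st) (mem, new))
        = (mem ++ Δ, new ++ Δ) ∧
      Shape3 vis' m.toNat n.toNat (jc + 1).toNat ∧
      InvV jc n m vis' (mem ++ Δ) ∧
      (mem ++ Δ).Nodup ∧
      (∀ t ∈ Δ, OkSt jc n m t ∧ ∃ s ∈ f, t ∈ movesB jc n m field s) ∧
      (∀ s ∈ f, ∀ t ∈ movesB jc n m field s, t ∈ mem ++ Δ) := by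
  intro f
  induction f with
  | nil =>
    intro fl vis nxt mem new _ hsh hInv hnd
    exact ⟨[], vis, by simp, by simp, hsh, by simpa using hInv, by simpa using hnd,
      by simp, by simp⟩
  | cons s rest ih =>
    intro fl vis nxt mem new hf hsh hInv hnd
    obtain ⟨hsOk, hsTgt⟩ := hf s List.mem_cons_self
    obtain ⟨x, y, j⟩ := s
    have hmOk : ∀ t ∈ movesB jc n m field (x, y, j), OkSt jc n m t := by
      intro t ht
      exact movesB_ok jc n m field (x, y, j) t hsOk.2.2.2.2.1 hsOk.2.2.2.2.2 ht
    obtain ⟨Δ1, e1, e2, e3, e4, e5, e6, e7⟩ :=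
      cand_sim jc n m (movesB jc n m field (x, y, j)) vis nxt mem new hmOk hsh hInv hnd
    -- unfold one loopB pop and fuse the two stepB folds into a markStep fold
    have hlen : (fl + ((x, y, j) :: rest).length) = (fl + rest.length) + 1 := by
      rw [List.length_cons]; omega
    have hunf : loopB jc n m field (fl + ((x, y, j) :: rest).length) vis ((x, y, j) :: rest) nxt d
        = loopB jc n m field (fl + rest.length)
            ((movesB jc n m field (x, y, j)).foldl markStep (vis, nxt)).1 rest
            ((movesB jc n m field (x, y, j)).foldl markStep (vis, nxt)).2 d := by
      rw [hlen]
      rw [show loopB jc n m field ((fl + rest.length) + 1) vis ((x, y, j) :: rest) nxt d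
          = if x = n - 1 ∧ y = m - 1 then d
            else
              let p1 := monkeyDirs.foldl (stepB n m field x y j) (vis, nxt)
              if jc ≤ j then loopB jc n m field (fl + rest.length) p1.1 rest p1.2 d
              else
                let p2 := horseDirs.foldl (stepB n m field x y (j + 1)) p1
                loopB jc n m field (fl + rest.length) p2.1 rest p2.2 d from by rw [loopB]]
      rw [if_neg hsTgt]
      have hpe := proc_eq jc n m field x y j (vis, nxt)
      rw [← hpe]
      by_cases hjmp : jc ≤ j
      · simp only [if_pos hjmp]
      · simp only [if_neg hjmp]
    obtain ⟨Δ2, vis', g1, g2, g3, g4, g5, g6, g7⟩ :=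
      ih fl ((movesB jc n m field (x, y, j)).foldl markStep (vis, nxt)).1 (nxt ++ Δ1)
        (mem ++ Δ1) (new ++ Δ1)
        (fun u hu => hf u (List.mem_cons_of_mem _ hu)) e3 e4 e5
    refine ⟨Δ1 ++ Δ2, vis', ?_, ?_, g3, ?_, ?_, ?_, ?_⟩
    · rw [hunf, e2, g1]
      rw [List.append_assoc]
    · rw [List.foldl_cons]
      rw [e1, g2]
      simp [List.append_assoc]
    · rw [← List.append_assoc]; exact g4
    · rw [← List.append_assoc]; exact g5
    · intro u hu
      rcases List.mem_append.mp hu with hu | hu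
      · exact ⟨(e6 u hu).1, (x, y, j), List.mem_cons_self, (e6 u hu).2⟩
      · obtain ⟨hok', s', hs', hms'⟩ := g6 u hu
        exact ⟨hok', s', List.mem_cons_of_mem _ hs', hms'⟩
    · intro u hu t ht
      rcases List.mem_cons.mp hu with rfl | hu
      · have := e7 t ht
        rcases List.mem_append.mp this with h' | h'
        · exact List.mem_append_left _ h'
        · exact List.mem_append_right _ (List.mem_append_left _ h')
      · have := g7 u hu t ht
        simp only [List.append_assoc] at this ⊢
        exact this

-- distinct in-bounds states are at most n*m*(jc+1) many
lemma card_bound (jc n m : Int) (R : List (Int × Int × Int))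
    (hnd : R.Nodup) (hok : ∀ s ∈ R, OkSt jc n m s) : R.length ≤ VV jc n m := by
  cases R with
  | nil => simp
  | cons a R' =>
    have hA := hok a List.mem_cons_self
    have hn : 1 ≤ n := by obtain ⟨h1, h2, _⟩ := hA; omega
    have hm : 1 ≤ m := by obtain ⟨_, _, h3, h4, _⟩ := hA; omega
    have hjc : 0 ≤ jc := by obtain ⟨_, _, _, _, h5, h6⟩ := hA; omega
    set R := a :: R'
    set N := n.toNat with hN
    set M := m.toNat with hM
    set K := (jc + 1).toNat with hK
    have hVV : VV jc n m = N * M * K := by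
      have hn' : ((N : Int)) = n := Int.toNat_of_nonneg (by omega)
      have hm' : ((M : Int)) = m := Int.toNat_of_nonneg (by omega)
      have hk' : ((K : Int)) = jc + 1 := Int.toNat_of_nonneg (by omega)
      unfold VV
      rw [← hn', ← hm', ← hk', ← Nat.cast_mul, ← Nat.cast_mul, Int.toNat_natCast]
    set enc : Int × Int × Int → Nat :=
      fun s => s.1.toNat + N * (s.2.1.toNat + M * s.2.2.toNat) with henc
    have hbound : ∀ s ∈ R, enc s < N * M * K := by
      intro s hs
      obtain ⟨h1, h2, h3, h4, h5, h6⟩ := hok s hs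
      have hx : s.1.toNat < N := by omega
      have hy : s.2.1.toNat < M := by omega
      have hj : s.2.2.toNat < K := by omega
      have e1 : N * (s.2.1.toNat + 1) ≤ N * M := Nat.mul_le_mul_left _ hy
      have e2 : N * M * (s.2.2.toNat + 1) ≤ N * M * K := Nat.mul_le_mul_left _ hj
      have e3 : N * (s.2.1.toNat + M * s.2.2.toNat)
          = N * s.2.1.toNat + N * M * s.2.2.toNat := by ring
      have e4 : N * (s.2.1.toNat + 1) = N * s.2.1.toNat + N := by ring
      have e5 : N * M * (s.2.2.toNat + 1) = N * M * s.2.2.toNat + N * M := by ring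
      rw [henc]
      simp only []
      omega
    have hinj : ∀ s ∈ R, ∀ t ∈ R, enc s = enc t → s = t := by
      intro s hs t ht he
      obtain ⟨h1, h2, h3, h4, h5, h6⟩ := hok s hs
      obtain ⟨g1, g2, g3, g4, g5, g6⟩ := hok t ht
      have hx : s.1.toNat < N := by omega
      have hy : s.2.1.toNat < M := by omega
      have gx : t.1.toNat < N := by omega
      have gy : t.2.1.toNat < M := by omega
      rw [henc] at he
      simp only [] at he
      have hxeq : s.1.toNat = t.1.toNat := by
        have := congrArg (fun v => v % N) he
        simpa [Nat.add_mul_mod_self_left, Nat.mod_eq_of_lt hx, Nat.mod_eq_of_lt gx] using this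
      have hrest : s.2.1.toNat + M * s.2.2.toNat = t.2.1.toNat + M * t.2.2.toNat := by
        have hN0 : 0 < N := by omega
        have := he
        rw [hxeq] at this
        have hmul : N * (s.2.1.toNat + M * s.2.2.toNat)
            = N * (t.2.1.toNat + M * t.2.2.toNat) := by omega
        exact Nat.eq_of_mul_eq_mul_left hN0 hmul
      have hyeq : s.2.1.toNat = t.2.1.toNat := by
        have := congrArg (fun v => v % M) hrest
        simpa [Nat.add_mul_mod_self_left, Nat.mod_eq_of_lt hy, Nat.mod_eq_of_lt gy] using this
      have hjeq : s.2.2.toNat = t.2.2.toNat := by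
        have hM0 : 0 < M := by omega
        have hmul : M * s.2.2.toNat = M * t.2.2.toNat := by omega
        exact Nat.eq_of_mul_eq_mul_left hM0 hmul
      exact okst_inj jc n m t s (hok t ht) (hok s hs) ⟨hyeq, hxeq, hjeq⟩
    have hmapnd : (R.map enc).Nodup := hnd.map_on hinj
    have hsub : (R.map enc).toFinset ⊆ Finset.range (N * M * K) := by
      intro v hv
      rw [List.mem_toFinset, List.mem_map] at hv
      obtain ⟨s, hs, rfl⟩ := hv
      rw [Finset.mem_range]
      exact hbound s hs
    calc R.length = (R.map enc).length := (List.length_map _).symm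
      _ = (R.map enc).toFinset.card := (List.toFinset_card_of_nodup hmapnd).symm
      _ ≤ (Finset.range (N * M * K)).card := Finset.card_le_card hsub
      _ = N * M * K := Finset.card_range _
      _ = VV jc n m := hVV.symm

lemma getD_map_range' {α : Type} (k : Nat) (g : Nat → α) (i : Nat) (d : α) (h : i < k) :
    ((List.range k).map g).getD i d = g i := by
  rw [List.getD_eq_getElem _ _ (by simpa using h)]
  simp

-- a Shape3 table is determined by its in-range entries
lemma table_ext {t u : List (List (List Bool))} {M N K : Nat}
    (ht : Shape3 t M N K) (hu : Shape3 u M N K)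
    (h : ∀ y x j, y < M → x < N → j < K → get3 t false y x j = get3 u false y x j) :
    t = u := by
  apply List.ext_getElem (by rw [ht.1, hu.1])
  intro y hy1 hy2
  have hyM : y < M := by rw [← ht.1]; exact hy1
  have e1t : t.getD y [] = t[y] := List.getD_eq_getElem _ _ hy1
  have e1u : u.getD y [] = u[y] := List.getD_eq_getElem _ _ hy2
  obtain ⟨hrlt, hclt⟩ := ht.2 _ (List.getElem_mem hy1)
  obtain ⟨hrlu, hclu⟩ := hu.2 _ (List.getElem_mem hy2)
  apply List.ext_getElem (by rw [hrlt, hrlu])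
  intro x hx1 hx2
  have hxN : x < N := by rw [← hrlt]; exact hx1
  have e2t : (t.getD y []).getD x [] = t[y][x] := by rw [e1t]; exact List.getD_eq_getElem _ _ hx1
  have e2u : (u.getD y []).getD x [] = u[y][x] := by rw [e1u]; exact List.getD_eq_getElem _ _ hx2
  apply List.ext_getElem (by rw [hclt _ (List.getElem_mem hx1), hclu _ (List.getElem_mem hx2)])
  intro j hj1 hj2
  have hjK : j < K := by rw [← hclt _ (List.getElem_mem hx1)]; exact hj1
  have e3t : get3 t false y x j = t[y][x][j] := by
    unfold get3; rw [e2t]; exact List.getD_eq_getElem _ _ hj1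
  have e3u : get3 u false y x j = u[y][x][j] := by
    unfold get3; rw [e2u]; exact List.getD_eq_getElem _ _ hj2
  rw [← e3t, ← e3u]
  exact h y x j hyM hxN hjK

lemma row_len {t : List (List (List Bool))} {M N K y x : Nat}
    (ht : Shape3 t M N K) (hy : y < M) (hx : x < N) :
    ((t.getD y []).getD x []).length = K := by
  have hy' : y < t.length := by rw [ht.1]; exact hy
  have hrowmem : t.getD y [] ∈ t := by
    rw [List.getD_eq_getElem _ _ hy']; exact List.getElem_mem hy'
  obtain ⟨hrl, hcl⟩ := ht.2 _ hrowmem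
  have hx' : x < (t.getD y []).length := by rw [hrl]; exact hx
  have hcellmem : (t.getD y []).getD x [] ∈ t.getD y [] := by
    rw [List.getD_eq_getElem _ _ hx']; exact List.getElem_mem hx'
  exact hcl _ hcellmem

lemma shape3_nxt (jc n m : Int) (field : List (List Int)) (reach : List (List (List Bool))) :
    Shape3 (nxtTable jc n m field reach) m.toNat n.toNat (jc + 1).toNat := by
  refine ⟨by simp [nxtTable], ?_⟩
  intro r hr
  simp only [nxtTable, List.mem_map] at hr
  obtain ⟨_, _, hr⟩ := hr
  subst hr
  refine ⟨by simp, ?_⟩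
  intro c hc
  simp only [List.mem_map] at hc
  obtain ⟨_, _, hc⟩ := hc
  subst hc
  simp

lemma nxt_get (jc n m : Int) (field : List (List Int)) (reach : List (List (List Bool)))
    (y x j : Nat) (hy : y < m.toNat) (hx : x < n.toNat) (hj : j < (jc + 1).toNat) :
    get3 (nxtTable jc n m field reach) false y x j = pullEntry n m field reach y x j := by
  unfold get3 nxtTable
  rw [getD_map_range' _ _ _ _ hy, getD_map_range' _ _ _ _ hx, getD_map_range' _ _ _ _ hj]

-- membership in movesB, unfolded
lemma movesB_char (jc n m : Int) (field : List (List Int)) (s c : Int × Int × Int) :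
    c ∈ movesB jc n m field s ↔
    ((∃ dxy ∈ monkeyDirs, c = (s.1 + dxy.1, s.2.1 + dxy.2, s.2.2)) ∨
      (s.2.2 < jc ∧ ∃ dxy ∈ horseDirs, c = (s.1 + dxy.1, s.2.1 + dxy.2, s.2.2 + 1))) ∧
    (0 ≤ c.1 ∧ c.1 < n ∧ 0 ≤ c.2.1 ∧ c.2.1 < m ∧ fieldAt field c.2.1 c.1 ≠ 1) := by
  unfold movesB
  rw [List.mem_filter]
  simp only [decide_eq_true_eq, List.mem_append, List.mem_map]
  constructor
  · rintro ⟨hc, hb⟩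
    refine ⟨?_, hb⟩
    rcases hc with ⟨dxy, hd, rfl⟩ | hc
    · exact Or.inl ⟨dxy, hd, rfl⟩
    · split at hc
      · simp only [List.mem_map] at hc
        obtain ⟨dxy, hd, rfl⟩ := hc
        exact Or.inr ⟨by assumption, dxy, hd, rfl⟩
      · simp at hc
  · rintro ⟨hc, hb⟩
    refine ⟨?_, hb⟩
    rcases hc with ⟨dxy, hd, rfl⟩ | ⟨hlt, dxy, hd, rfl⟩
    · exact Or.inl ⟨dxy, hd, rfl⟩
    · right
      rw [if_pos hlt]
      simp only [List.mem_map]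
      exact ⟨dxy, hd, rfl⟩

-- an in-range cell, as a state
lemma cell_ok (jc n m : Int) (hn : 1 ≤ n) (hm : 1 ≤ m) (hjc : 0 ≤ jc) (x y j : Nat)
    (hx : x < n.toNat) (hy : y < m.toNat) (hj : j < (jc + 1).toNat) :
    OkSt jc n m ((x : Int), (y : Int), (j : Int)) := by
  refine ⟨by positivity, ?_, by positivity, ?_, by positivity, ?_⟩ <;> · simp only []; omega

-- the target-row check of loopT reads exactly "some target state is in R"
lemma target_row (jc n m : Int) (hn : 1 ≤ n) (hm : 1 ≤ m) (hjc : 0 ≤ jc)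
    (vis : List (List (List Bool))) (R : List (Int × Int × Int))
    (hsh : Shape3 vis m.toNat n.toNat (jc + 1).toNat) (hInv : InvV jc n m vis R) :
    (((vis.getD (m - 1).toNat []).getD (n - 1).toNat []).any (fun b => b) = true)
      ↔ ∃ s ∈ R, s.1 = n - 1 ∧ s.2.1 = m - 1 := by
  have hL : ((vis.getD (m - 1).toNat []).getD (n - 1).toNat []).length = (jc + 1).toNat :=
    row_len hsh (by omega) (by omega)
  rw [List.any_eq_true]
  constructor
  · rintro ⟨b, hb, hbt⟩
    subst hbt
    obtain ⟨i, hi, hLi⟩ := List.mem_iff_getElem.mp hb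
    have hiK : i < (jc + 1).toNat := by rw [← hL]; exact hi
    have hOk : OkSt jc n m (n - 1, m - 1, (i : Int)) :=
      ⟨show (0 : Int) ≤ n - 1 by omega, show n - 1 < n by omega,
       show (0 : Int) ≤ m - 1 by omega, show m - 1 < m by omega,
       show (0 : Int) ≤ (i : Int) by positivity, show (i : Int) ≤ jc by omega⟩
    refine ⟨(n - 1, m - 1, (i : Int)), ?_, rfl, rfl⟩
    apply (hInv.2 _ hOk).mp
    show get3 vis false (m - 1).toNat (n - 1).toNat ((i : Int)).toNat = true
    rw [show ((i : Int)).toNat = i from by omega]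
    show ((vis.getD (m - 1).toNat []).getD (n - 1).toNat []).getD i false = true
    rw [List.getD_eq_getElem _ _ hi]
    exact hLi
  · rintro ⟨s, hsR, h1, h2⟩
    have hOk := hInv.1 s hsR
    have hget := (hInv.2 s hOk).mpr hsR
    obtain ⟨_, _, _, _, hj0, hjc'⟩ := hOk
    have hjK : s.2.2.toNat < (jc + 1).toNat := by omega
    have hjL : s.2.2.toNat < ((vis.getD (m - 1).toNat []).getD (n - 1).toNat []).length := by
      rw [hL]; exact hjK
    refine ⟨((vis.getD (m - 1).toNat []).getD (n - 1).toNat [])[s.2.2.toNat], List.getElem_mem hjL, ?_⟩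
    rw [← List.getD_eq_getElem _ false hjL]
    show get3 vis false (m - 1).toNat (n - 1).toNat s.2.2.toNat = true
    rw [← h1, ← h2]
    exact hget

-- the recomputed table of one pull round equals the frontier round's marked table
lemma pull_round (jc n m : Int) (field : List (List Int))
    (hn : 1 ≤ n) (hm : 1 ≤ m) (hjc : 0 ≤ jc)
    (vis vis' : List (List (List Bool))) (old f Δ : List (Int × Int × Int))
    (hsh' : Shape3 vis' m.toNat n.toNat (jc + 1).toNat)
    (hInv : InvV jc n m vis (old ++ f))
    (hInv' : InvV jc n m vis' (old ++ f ++ Δ))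
    (hstab : ∀ s ∈ old, ∀ t ∈ movesB jc n m field s, t ∈ old ++ f)
    (hΔ : ∀ t ∈ Δ, OkSt jc n m t ∧ ∃ s ∈ f, t ∈ movesB jc n m field s)
    (hcov : ∀ s ∈ f, ∀ t ∈ movesB jc n m field s, t ∈ old ++ f ++ Δ) :
    nxtTable jc n m field vis = vis' := by
  apply table_ext (shape3_nxt jc n m field vis) hsh'
  intro y x j hy hx hj
  rw [nxt_get jc n m field vis y x j hy hx hj]
  have hc : OkSt jc n m ((x : Int), (y : Int), (j : Int)) :=
    cell_ok jc n m hn hm hjc x y j hx hy hj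
  have hR' : get3 vis' false y x j = true ↔ ((x : Int), (y : Int), (j : Int)) ∈ old ++ f ++ Δ := by
    have := hInv'.2 _ hc
    simpa using this
  have hR : get3 vis false y x j = true ↔ ((x : Int), (y : Int), (j : Int)) ∈ old ++ f := by
    have := hInv.2 _ hc
    simpa using this
  have key : pullEntry n m field vis y x j = true ↔ get3 vis' false y x j = true := by
    rw [hR']
    simp only [pullEntry, Bool.or_eq_true, Bool.and_eq_true, List.any_eq_true,
      decide_eq_true_eq, bne_iff_ne]
    constructor
    · rintro (hv | ⟨hfield, hpred⟩)
      · exact List.mem_append_left _ (hR.mp hv)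
      · rcases hpred with ⟨dxy, hdm, ⟨hb1, hb2, hb3, hb4⟩, hget⟩ |
          ⟨hj1, dxy, hdm, ⟨hb1, hb2, hb3, hb4⟩, hget⟩
        · -- a monkey predecessor at the same level
          have hpOk : OkSt jc n m ((x : Int) - dxy.1, (y : Int) - dxy.2, (j : Int)) :=
            ⟨hb1, hb2, hb3, hb4, show (0 : Int) ≤ (j : Int) by positivity,
             show ((j : Int)) ≤ jc by omega⟩
          have hpR : ((x : Int) - dxy.1, (y : Int) - dxy.2, (j : Int)) ∈ old ++ f := by
            apply (hInv.2 _ hpOk).mp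
            show get3 vis false ((y : Int) - dxy.2).toNat ((x : Int) - dxy.1).toNat
              ((j : Int)).toNat = true
            rw [show ((j : Int)).toNat = j from by omega]
            exact hget
          have hcm : ((x : Int), (y : Int), (j : Int)) ∈
              movesB jc n m field ((x : Int) - dxy.1, (y : Int) - dxy.2, (j : Int)) := by
            apply (movesB_char jc n m field _ _).mpr
            refine ⟨Or.inl ⟨dxy, hdm, ?_⟩,
              show (0 : Int) ≤ (x : Int) by positivity, show ((x : Int)) < n by omega,
              show (0 : Int) ≤ (y : Int) by positivity, show ((y : Int)) < m by omega, hfield⟩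
            show ((x : Int), (y : Int), (j : Int))
              = ((x : Int) - dxy.1 + dxy.1, (y : Int) - dxy.2 + dxy.2, (j : Int))
            simp only [Prod.mk.injEq]
            exact ⟨by omega, by omega, trivial⟩
          rcases List.mem_append.mp hpR with hpo | hpf
          · exact List.mem_append_left _ (hstab _ hpo _ hcm)
          · exact hcov _ hpf _ hcm
        · -- a horse predecessor one level below
          have hpOk : OkSt jc n m ((x : Int) - dxy.1, (y : Int) - dxy.2, (j : Int) - 1) :=
            ⟨hb1, hb2, hb3, hb4, show (0 : Int) ≤ (j : Int) - 1 by omega,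
             show ((j : Int)) - 1 ≤ jc by omega⟩
          have hpR : ((x : Int) - dxy.1, (y : Int) - dxy.2, (j : Int) - 1) ∈ old ++ f := by
            apply (hInv.2 _ hpOk).mp
            show get3 vis false ((y : Int) - dxy.2).toNat ((x : Int) - dxy.1).toNat
              ((j : Int) - 1).toNat = true
            rw [show ((j : Int) - 1).toNat = j - 1 from by omega]
            exact hget
          have hcm : ((x : Int), (y : Int), (j : Int)) ∈
              movesB jc n m field ((x : Int) - dxy.1, (y : Int) - dxy.2, (j : Int) - 1) := by
            apply (movesB_char jc n m field _ _).mpr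
            refine ⟨Or.inr ⟨show ((j : Int)) - 1 < jc by omega, dxy, hdm, ?_⟩,
              show (0 : Int) ≤ (x : Int) by positivity, show ((x : Int)) < n by omega,
              show (0 : Int) ≤ (y : Int) by positivity, show ((y : Int)) < m by omega, hfield⟩
            show ((x : Int), (y : Int), (j : Int))
              = ((x : Int) - dxy.1 + dxy.1, (y : Int) - dxy.2 + dxy.2, (j : Int) - 1 + 1)
            simp only [Prod.mk.injEq]
            exact ⟨by omega, by omega, by omega⟩
          rcases List.mem_append.mp hpR with hpo | hpf
          · exact List.mem_append_left _ (hstab _ hpo _ hcm)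
          · exact hcov _ hpf _ hcm
    · intro hmem
      rcases List.mem_append.mp hmem with hof | hΔm
      · exact Or.inl (hR.mpr hof)
      · obtain ⟨hcOk, s, hsf, hcm⟩ := hΔ _ hΔm
        obtain ⟨hmove, hb⟩ := (movesB_char jc n m field s _).mp hcm
        have hsR : s ∈ old ++ f := List.mem_append_right _ hsf
        have hsOk : OkSt jc n m s := hInv.1 s hsR
        have hgs := (hInv.2 s hsOk).mpr hsR
        obtain ⟨hs1, hs2, hs3, hs4, hs5, hs6⟩ := hsOk
        right
        refine ⟨hb.2.2.2.2, ?_⟩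
        rcases hmove with ⟨dxy, hdm, hceq⟩ | ⟨hlt, dxy, hdm, hceq⟩
        · left
          have e1 : (x : Int) = s.1 + dxy.1 := congrArg Prod.fst hceq
          have e2 : (y : Int) = s.2.1 + dxy.2 := congrArg (fun t => t.2.1) hceq
          have e3 : (j : Int) = s.2.2 := congrArg (fun t => t.2.2) hceq
          refine ⟨dxy, hdm, ⟨by omega, by omega, by omega, by omega⟩, ?_⟩
          rw [show ((y : Int) - dxy.2) = s.2.1 from by omega,
              show ((x : Int) - dxy.1) = s.1 from by omega,
              show j = s.2.2.toNat from by omega]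
          exact hgs
        · right
          have e1 : (x : Int) = s.1 + dxy.1 := congrArg Prod.fst hceq
          have e2 : (y : Int) = s.2.1 + dxy.2 := congrArg (fun t => t.2.1) hceq
          have e3 : (j : Int) = s.2.2 + 1 := congrArg (fun t => t.2.2) hceq
          refine ⟨by omega, dxy, hdm, ⟨by omega, by omega, by omega, by omega⟩, ?_⟩
          rw [show ((y : Int) - dxy.2) = s.2.1 from by omega,
              show ((x : Int) - dxy.1) = s.1 from by omega,
              show j - 1 = s.2.2.toNat from by omega]
          exact hgs
  cases hpv : pullEntry n m field vis y x j
  · cases hv' : get3 vis' false y x j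
    · rfl
    · exact absurd (key.mpr hv') (by rw [hpv]; simp)
  · exact (key.mp hpv).symm

-- the main simulation: level BFS = whole-table fixpoint iteration
lemma sim (jc n m : Int) (field : List (List Int))
    (hn : 1 ≤ n) (hm : 1 ≤ m) (hjc : 0 ≤ jc) :
    ∀ (fs fl : Nat) (vis : List (List (List Bool)))
      (old f : List (Int × Int × Int)) (d : Int),
    Shape3 vis m.toNat n.toNat (jc + 1).toNat →
    InvV jc n m vis (old ++ f) →
    (old ++ f).Nodup →
    (∀ s ∈ old, ∀ t ∈ movesB jc n m field s, t ∈ old ++ f) →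
    (∀ s ∈ old, ¬(s.1 = n - 1 ∧ s.2.1 = m - 1)) →
    VV jc n m + 1 ≤ old.length + fl →
    VV jc n m + 2 ≤ old.length + fs →
    loopB jc n m field fl vis f [] d = loopT jc n m field fs vis d := by
  intro fs
  induction fs with
  | zero =>
    intro fl vis old f d hsh hInv hnd hstab htgt hfl hfs
    exfalso
    have := card_bound jc n m (old ++ f) hnd hInv.1
    rw [List.length_append] at this
    omega
  | succ fs ih =>
    intro fl vis old f d hsh hInv hnd hstab htgt hfl hfs
    have hcard := card_bound jc n m (old ++ f) hnd hInv.1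
    rw [List.length_append] at hcard
    rw [show loopT jc n m field (fs + 1) vis d
        = if ((vis.getD (m - 1).toNat []).getD (n - 1).toNat []).any (fun b => b) then d
          else
            let nxt := nxtTable jc n m field vis
            if nxt = vis then -1
            else loopT jc n m field fs nxt (d + 1) from rfl]
    by_cases htf : ∃ s ∈ f, s.1 = n - 1 ∧ s.2.1 = m - 1
    · obtain ⟨s, hsf, hs1, hs2⟩ := htf
      have hany := (target_row jc n m hn hm hjc vis (old ++ f) hsh hInv).mpr
        ⟨s, List.mem_append_right _ hsf, hs1, hs2⟩
      rw [if_pos hany]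
      exact loopB_target jc n m field f fl vis [] d ⟨s, hsf, hs1, hs2⟩ (by omega)
    · have hany : (((vis.getD (m - 1).toNat []).getD (n - 1).toNat []).any (fun b => b)) = false := by
        cases hc : (((vis.getD (m - 1).toNat []).getD (n - 1).toNat []).any (fun b => b))
        · rfl
        · exfalso
          obtain ⟨s, hsR, hs1, hs2⟩ := (target_row jc n m hn hm hjc vis (old ++ f) hsh hInv).mp hc
          rcases List.mem_append.mp hsR with hs | hs
          · exact htgt s hs ⟨hs1, hs2⟩
          · exact htf ⟨s, hs, hs1, hs2⟩
      rw [if_neg (by rw [hany]; simp)]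
      obtain ⟨fl', rfl⟩ : ∃ fl', fl = fl' + f.length := ⟨fl - f.length, by omega⟩
      obtain ⟨Δ, vis', g1, g2, g3, g4, g5, g6, g7⟩ :=
        round_sim jc n m field d f fl' vis [] (old ++ f) []
          (fun s hs => ⟨hInv.1 s (List.mem_append_right _ hs),
            fun hc => htf ⟨s, hs, hc⟩⟩) hsh hInv hnd
      have hpull : nxtTable jc n m field vis = vis' :=
        pull_round jc n m field hn hm hjc vis vis' old f Δ g3 hInv g4 hstab g6 g7
      simp only []
      cases hΔ : Δ with
      | nil =>
        subst hΔ
        have hveq : vis' = vis := by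
          apply table_ext g3 hsh
          intro y x j hy hx hj
          have hc := cell_ok jc n m hn hm hjc x y j hx hy hj
          have h1 := (by simpa using g4.2 _ hc :
            get3 vis' false y x j = true ↔ ((x : Int), (y : Int), (j : Int)) ∈ old ++ f)
          have h2 := (by simpa using hInv.2 _ hc :
            get3 vis false y x j = true ↔ ((x : Int), (y : Int), (j : Int)) ∈ old ++ f)
          cases hv : get3 vis false y x j
          · cases hv' : get3 vis' false y x j
            · rfl
            · exact absurd (h2.mpr (h1.mp hv')) (by rw [hv]; simp)
          · rw [h1.mpr (h2.mp hv)]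
      
        rw [if_pos (by rw [hpull, hveq])]
        rw [g1]
        simp [loopB]
      | cons e Δ' =>
        subst hΔ
        have hne : nxtTable jc n m field vis ≠ vis := by
          rw [hpull]
          intro hveq
          have heok : OkSt jc n m e := (g6 e List.mem_cons_self).1
          have h1 := g4.2 e heok
          have h2 := hInv.2 e heok
          rw [hveq] at h1
          have : e ∈ old ++ f := h2.mp (h1.mpr (by simp))
          have hnd' : ¬ e ∈ old ++ f := by
            have := g5
            rw [List.nodup_append] at this
            exact fun hmem => this.2.2 e hmem e List.mem_cons_self rfl
          exact hnd' this
        rw [if_neg hne, hpull]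
        have hswap : loopB jc n m field fl' vis' [] ([] ++ (e :: Δ')) d
            = loopB jc n m field fl' vis' (e :: Δ') [] (d + 1) := by
          rw [List.nil_append]
          rw [loopB]
        rw [g1, hswap]
        have := ih fl' vis' (old ++ f) (e :: Δ') (d + 1) g3 g4 g5
          (by
            intro s hs t ht
            rcases List.mem_append.mp hs with hs | hs
            · exact List.mem_append_left _ (hstab s hs t ht)
            · exact g7 s hs t ht)
          (by
            intro s hs
            rcases List.mem_append.mp hs with hs | hs
            · exact htgt s hs
            · exact fun hc => htf ⟨s, hs, hc⟩)
          (by rw [List.length_append]; omega)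
          (by
            rw [List.length_append]
            have hfne : 1 ≤ f.length := by
              cases f with
              | nil => simp at g2
              | cons a b => simp
            omega)
        rw [this]

-- A equals the level BFS (assembled from the lockstep lemma)
lemma A_eq_levelBFS (jc n m : Int) (field : List (List Int))
    (hjc : 0 ≤ jc) (hn : 1 ≤ n) (hm : 1 ≤ m) :
    solve jc n m field
      = loopB jc n m field (VV jc n m + 1)
          (set3 ((List.range m.toNat).map (fun _ =>
            (List.range n.toNat).map (fun _ =>
              (List.range (jc + 1).toNat).map (fun _ => false)))) 0 0 0 true)
          [(0, 0, 0)] [] 0 := by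
  unfold solve
  simp only []
  set dist0 : List (List (List Int)) :=
    (List.range m.toNat).map (fun _ =>
      (List.range n.toNat).map (fun _ =>
        (List.range (jc + 1).toNat).map (fun _ => (-1 : Int)))) with hdist0
  have hshape0 : Shape3 dist0 m.toNat n.toNat (jc + 1).toNat := shape3_init _ _ _ _
  have hm0 : 0 < m.toNat := by omega
  have hn0 : 0 < n.toNat := by omega
  have hk0 : 0 < (jc + 1).toNat := by omega
  have hylen : (0 : Nat) < dist0.length := by rw [hshape0.1]; exact hm0
  have hrowmem : dist0.getD 0 [] ∈ dist0 := by
    rw [List.getD_eq_getElem _ _ hylen]; exact List.getElem_mem hylen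
  have hxlen : (0 : Nat) < (dist0.getD 0 []).length := by
    rw [(hshape0.2 _ hrowmem).1]; exact hn0
  have hcellmem : (dist0.getD 0 []).getD 0 [] ∈ dist0.getD 0 [] := by
    rw [List.getD_eq_getElem _ _ hxlen]; exact List.getElem_mem hxlen
  have hjlen : (0 : Nat) < ((dist0.getD 0 []).getD 0 []).length := by
    rw [(hshape0.2 _ hrowmem).2 _ hcellmem]; exact hk0
  have hget0 : get3 (set3 dist0 0 0 0 0) (-1) 0 0 0 =
      0 := get3_set3_same (-1) 0 hylen hxlen hjlen
  have hvis : ((List.range m.toNat).map (fun _ =>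
      (List.range n.toNat).map (fun _ =>
        (List.range (jc + 1).toNat).map (fun _ => false))) : List (List (List Bool)))
      = mapVis dist0 := by
    rw [hdist0]
    unfold mapVis
    simp
  have hvset : (set3 ((List.range m.toNat).map (fun _ =>
      (List.range n.toNat).map (fun _ =>
        (List.range (jc + 1).toNat).map (fun _ => false)))) 0 0 0 true)
      = mapVis (set3 dist0 0 0 0 0) := by
    rw [hvis, mapVis_set3]
    rfl
  rw [hvset]
  have := main_rel jc n m field (2 * (VV jc n m + 1))
    (VV jc n m + 1) (set3 dist0 0 0 0 0) [(0, 0, 0)] [] 0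
    (by simp) (shape3_set3 hshape0 0 0 0 0) le_rfl
    (by
      intro s hs
      rcases List.mem_cons.mp hs with hs | hs
      · subst hs
        exact ⟨⟨le_refl 0, by show (0:Int) < n; omega, le_refl 0,
          by show (0:Int) < m; omega, le_refl 0, hjc⟩, hget0⟩
      · simp at hs)
    (by simp)
  rw [show ((n * m * (jc + 1)).toNat + 1) = VV jc n m + 1 from rfl]
  simpa using this

-- ===== VERDICT (by name: the statement is the Claim_ definition above) =====
theorem solve_spec : Claim_equal_solve := by
  intro jc n m field _hdom hpre
  obtain ⟨hjc, hn, hm, _hgrid⟩ := hpre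
  unfold Spec_solve
  rw [A_eq_levelBFS jc n m field hjc hn hm]
  set vis0 : List (List (List Bool)) :=
    (List.range m.toNat).map (fun _ =>
      (List.range n.toNat).map (fun _ =>
        (List.range (jc + 1).toNat).map (fun _ => false))) with hvis0
  have hshape0 : Shape3 vis0 m.toNat n.toNat (jc + 1).toNat := shape3_init _ _ _ _
  have hz : OkSt jc n m ((0 : Int), (0 : Int), (0 : Int)) :=
    ⟨le_refl 0, by show (0:Int) < n; omega, le_refl 0, by show (0:Int) < m; omega,
     le_refl 0, hjc⟩
  obtain ⟨hy, hx, hj⟩ := okst_idx jc n m ((0 : Int), (0 : Int), (0 : Int)) hz vis0 hshape0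
  have hy0 : (0 : Nat) < vis0.length := hy
  have hx0 : (0 : Nat) < (vis0.getD 0 []).length := hx
  have hj0 : (0 : Nat) < ((vis0.getD 0 []).getD 0 []).length := hj
  have hInv0 : InvV jc n m (set3 vis0 0 0 0 true) [((0 : Int), (0 : Int), (0 : Int))] := by
    refine ⟨?_, ?_⟩
    · intro t ht
      obtain rfl := List.mem_singleton.mp ht
      exact hz
    · intro t htOk
      by_cases hidx : t.2.1.toNat = (0 : Nat) ∧ t.1.toNat = (0 : Nat) ∧ t.2.2.toNat = (0 : Nat)
      · have ht : t = ((0 : Int), (0 : Int), (0 : Int)) :=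
          okst_inj jc n m ((0 : Int), (0 : Int), (0 : Int)) t hz htOk hidx
        subst ht
        show get3 (set3 vis0 0 0 0 true) false 0 0 0 = true ↔ _
        rw [get3_set3_same false true hy0 hx0 hj0]
        simp
      · rw [get3_set3_ne vis0 false true hidx]
        rw [show get3 vis0 false t.2.1.toNat t.1.toNat t.2.2.toNat = false from by
          rw [hvis0]; exact get3_init_const _ _ _ _ _ _ _]
        simp only [List.mem_singleton]
        constructor
        · intro h; exact absurd h (by simp)
        · intro h
          subst h
          exact absurd ⟨rfl, rfl, rfl⟩ hidx
  have := sim jc n m field hn hm hjc (VV jc n m + 2) (VV jc n m + 1)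
    (set3 vis0 0 0 0 true) [] [((0 : Int), (0 : Int), (0 : Int))] 0
    (shape3_set3 hshape0 0 0 0 true) (by simpa using hInv0) (by simp)
    (by simp) (by simp) (by simp) (by simp)
  rw [this]
  unfold solve_alt
  rw [show ((n * m * (jc + 1)).toNat + 2) = VV jc n m + 2 from rfl]
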